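-- pv_equiv track=rewrite | github.com/IftixorInTouch/leetcode | adventofcode2025/Day 6: Trash Compactor/part2.py | find_problems
-- ===== SOURCE A (Python) =====
-- def find_problems(lines):
--     """Return (problems, padded_lines)
--     problems = list of (start_col, end_col) for each vertical problem block.
--     """
--     height = len(lines)
--     width = max(len(line) for line in lines)
--
--     padded = [line.ljust(width) for line in lines]
--
--     sep = []
--     for c in range(width):
--         if all(padded[r][c] == " " for r in range(height)):
--             sep.append(True)
--         else:
--             sep.append(False)
--
--     problems = []
--     c = 0
--     while c < width:
--         if sep[c]:
--             c += 1
--             continue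
--         start = c
--         while c < width and not sep[c]:
--             c += 1
--         end = c - 1
--         problems.append((start, end))
--
--     return problems, padded
-- ===== SOURCE B (Python) =====
-- def find_problems(lines):
--     """Return (problems, padded_lines)
--     problems = list of (start_col, end_col) for each vertical problem block.
--     """
--     width = max(len(line) for line in lines)
--     padded = [line.ljust(width) for line in lines]
--
--     nonsep = [c for c, col in enumerate(zip(*padded))
--               if any(ch != ' ' for ch in col)]
--
--     problems = []
--     for c in nonsep:
--         if problems and problems[-1][1] == c - 1:
--             problems[-1] = (problems[-1][0], c)
--         else:
--             problems.append((c, c))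
--     return problems, padded
-- ===== Notes on version B (the rewrite author's own statement) =====
-- stated objective: simpler
-- what changed: A's two-level while-loop state machine that scans the sep boolean list for runs is replaced by transposing the padded grid with zip(*padded), collecting the non-blank column indices, and folding them into blocks by merging each index that is consecutive with the last block.
-- outside the precondition, e.g. on find_problems([]): A raises ValueError, B raises ValueError
import Mathlib
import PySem

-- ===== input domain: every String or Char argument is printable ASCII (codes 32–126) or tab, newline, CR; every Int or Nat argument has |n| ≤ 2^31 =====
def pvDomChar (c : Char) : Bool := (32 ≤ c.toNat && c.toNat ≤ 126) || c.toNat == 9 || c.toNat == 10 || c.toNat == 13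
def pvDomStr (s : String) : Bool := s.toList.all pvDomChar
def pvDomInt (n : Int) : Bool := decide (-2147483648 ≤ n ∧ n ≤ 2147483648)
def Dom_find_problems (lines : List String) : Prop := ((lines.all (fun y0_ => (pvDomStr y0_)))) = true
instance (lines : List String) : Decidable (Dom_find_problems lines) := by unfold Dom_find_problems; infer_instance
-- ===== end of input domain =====

-- B replaces A's two-level while state machine over the sep booleans by a
-- transpose + index-list + run-merging fold (simpler decomposition; same cost).

-- ===== PORT A =====

-- line.ljust(width): pad with spaces on the right (exact; width ≥ 0 here)
def pvLjust (cs : List Char) (w : Nat) : List Char :=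
  cs ++ List.replicate (w - cs.length) ' '

-- inner 'while c < width and not sep[c]: c += 1' of A: returns (final c, remaining sep)
def pvRun : List Bool → Int → Int × List Bool
  | [], c => (c, [])
  | b :: rest, c => if b then (c, b :: rest) else pvRun rest (c + 1)

theorem pvRun_len (sep : List Bool) (c : Int) : (pvRun sep c).2.length ≤ sep.length := by
  induction sep generalizing c with
  | nil => simp [pvRun]
  | cons b rest ih =>
    by_cases hb : b = true <;> simp [pvRun, hb]
    exact le_trans (ih (c + 1)) (Nat.le_succ _)

-- outer 'while c < width' of A over the sep list
def pvScan : List Bool → Int → List (Int × Int)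
  | [], _ => []
  | b :: rest, c =>
    if b then
      pvScan rest (c + 1)
    else
      let p := pvRun rest (c + 1)
      (c, p.1 - 1) :: pvScan p.2 p.1
termination_by sep _ => sep.length
decreasing_by
  · simp
  · have := pvRun_len rest (c + 1); simp; omega

def find_problems (lines : List String) : (List (Int × Int)) × List String :=
  match PySem.List.max? (lines.map (fun l => PySem.Str.len l)) (fun x => x) with
  | none => ([], [])  -- unreachable under Pre_ (Python max raises on an empty list)
  | some width =>
    let padded := lines.map (fun l => pvLjust l.toList width.toNat)
    let sep := (PySem.List.pyRange 0 width 1).map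
      (fun c => padded.all (fun row => PySem.List.pyGetD row c ' ' == ' '))
    (pvScan sep 0, padded.map (fun cs => String.ofList cs))

-- ===== PORT B =====

-- zip(*rows): columns until the shortest row is exhausted (exact zip semantics)
def pvTgo : List Char → List (List Char) → List (List Char)
  | [], _ => []
  | a :: r0, rs =>
    if rs.all (fun q => !q.isEmpty) then
      (a :: rs.map (fun q => q.headD ' ')) :: pvTgo r0 (rs.map List.tail)
    else []

def pvT : List (List Char) → List (List Char)
  | [] => []
  | r0 :: rs => pvTgo r0 rs

-- one step of B's merging loop over the non-separator column indices
def pvMerge (acc : List (Int × Int)) (c : Int) : List (Int × Int) :=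
  match acc.getLast? with
  | some p => if p.2 == c - 1 then acc.dropLast ++ [(p.1, c)] else acc ++ [(c, c)]
  | none => acc ++ [(c, c)]

def find_problems_alt (lines : List String) : (List (Int × Int)) × List String :=
  match PySem.List.max? (lines.map (fun l => PySem.Str.len l)) (fun x => x) with
  | none => ([], [])  -- unreachable under Pre_
  | some width =>
    let padded := lines.map (fun l => pvLjust l.toList width.toNat)
    let nonsep := ((PySem.List.enumerate (pvT padded) 0).filter
        (fun p => p.2.any (fun ch => ch != ' '))).map (fun p => p.1)
    (nonsep.foldl pvMerge [], padded.map (fun cs => String.ofList cs))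

-- ===== PRECONDITION & SPEC =====
-- Python A raises ValueError (max of an empty sequence) on lines = []; excluded.
def Pre_find_problems (lines : List String) : Prop := lines ≠ []
instance (lines : List String) : Decidable (Pre_find_problems lines) := by unfold Pre_find_problems; infer_instance

def pvWitness_find_problems : List String := ["ab  c", " b"]

def Spec_find_problems (lines : List String) (out : (List (Int × Int)) × List String) : Prop := out = find_problems_alt lines
instance (lines : List String) (out : (List (Int × Int)) × List String) : Decidable (Spec_find_problems lines out) := by unfold Spec_find_problems; infer_instance

-- ===== CLAIM (what is proved, stated in full; the proofs are below) =====
def Claim_equal_find_problems : Prop := ∀ (lines : List String), Dom_find_problems lines → Pre_find_problems lines → Spec_find_problems lines (find_problems lines)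

-- ===== LEMMAS AND PROOFS =====

-- the (increasing) indices of the 'false' entries of sep, from offset c
def pvFalseIdx : List Bool → Int → List Int
  | [], _ => []
  | b :: rest, c => if b then pvFalseIdx rest (c + 1) else c :: pvFalseIdx rest (c + 1)

theorem pvRun_snd (sep : List Bool) (c : Int) :
    (pvRun sep c).2 = [] ∨ ∃ r, (pvRun sep c).2 = true :: r := by
  induction sep generalizing c with
  | nil => simp [pvRun]
  | cons b rest ih =>
    by_cases hb : b = true
    · exact Or.inr ⟨rest, by simp [pvRun, hb]⟩
    · simpa [pvRun, hb] using ih (c + 1)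

-- absorbing a run of consecutive false columns into the current last block
theorem pvMerge_run (sep : List Bool) (c : Int) (acc : List (Int × Int)) (s : Int) :
    (pvFalseIdx sep c).foldl pvMerge (acc ++ [(s, c - 1)]) =
      (pvFalseIdx (pvRun sep c).2 (pvRun sep c).1).foldl pvMerge
        (acc ++ [(s, (pvRun sep c).1 - 1)]) := by
  induction sep generalizing c with
  | nil => simp [pvRun, pvFalseIdx]
  | cons b rest ih =>
    by_cases hb : b = true
    · simp [pvRun, pvFalseIdx, hb]
    · have hstep : pvMerge (acc ++ [(s, c - 1)]) c = acc ++ [(s, c)] := by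
        simp [pvMerge]
      simp only [pvRun, pvFalseIdx, hb, if_false, Bool.false_eq_true, List.foldl_cons]
      rw [hstep]
      have := ih (c + 1)
      simpa using this

theorem pvScan_merge (n : Nat) (sep : List Bool) (hn : sep.length ≤ n) (c : Int)
    (acc : List (Int × Int)) (hinv : ∀ p ∈ acc.getLast?, p.2 + 1 < c) :
    (pvFalseIdx sep c).foldl pvMerge acc = acc ++ pvScan sep c := by
  induction n generalizing sep c acc with
  | zero =>
    have : sep = [] := List.length_eq_zero_iff.mp (Nat.le_zero.mp hn)
    subst this; simp [pvFalseIdx, pvScan]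
  | succ n ih =>
    match sep with
    | [] => simp [pvFalseIdx, pvScan]
    | b :: rest =>
      have hrest : rest.length ≤ n := by simpa using hn
      by_cases hb : b = true
      · rw [show pvScan (b :: rest) c = pvScan rest (c + 1) by rw [pvScan]; simp [hb]]
        simp only [pvFalseIdx, hb, if_true]
        exact ih rest hrest (c + 1) acc (fun p hp => lt_trans (hinv p hp) (by omega))
      · have hstep : pvMerge acc c = acc ++ [(c, c)] := by
          match hacc : acc.getLast? with
          | none => simp [pvMerge, hacc]
          | some p =>
            have hpc := hinv p (by simp [hacc])
            have hne : (p.2 == c - 1) = false := by simp; omega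
            simp [pvMerge, hacc, hne]
        rw [show pvScan (b :: rest) c =
              (c, (pvRun rest (c + 1)).1 - 1) ::
                pvScan (pvRun rest (c + 1)).2 (pvRun rest (c + 1)).1 by
            rw [pvScan]; simp [hb]]
        simp only [pvFalseIdx, hb, if_false, Bool.false_eq_true, List.foldl_cons]
        rw [hstep]
        have habs := pvMerge_run rest (c + 1) acc c
        simp only [show c + 1 - 1 = c by omega] at habs
        rw [habs]
        rcases pvRun_snd rest (c + 1) with h2 | ⟨r'', h2⟩
        · rw [h2]; simp [pvFalseIdx, pvScan]
        · have hlen : r''.length ≤ n := by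
            have := pvRun_len rest (c + 1)
            rw [h2] at this; simp at this; omega
          rw [h2]
          rw [show pvScan (true :: r'') (pvRun rest (c + 1)).1 =
                pvScan r'' ((pvRun rest (c + 1)).1 + 1) by rw [pvScan]; simp]
          simp only [pvFalseIdx, if_true]
          rw [ih r'' hlen ((pvRun rest (c + 1)).1 + 1)
                (acc ++ [(c, (pvRun rest (c + 1)).1 - 1)])
                (by intro p hp; simp at hp; subst hp; omega)]
          simp

-- getD bridges used by the transpose lemma
theorem pvHeadD_getD (q : List Char) : q.headD ' ' = q.getD 0 ' ' := by
  cases q <;> simp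

theorem pvTailD_getD (q : List Char) (c : Nat) : q.tail.getD c ' ' = q.getD (c + 1) ' ' := by
  cases q <;> simp

-- zip(*rows) of a non-empty rectangular grid, column by column
theorem pvT_rect (w : Nat) (rows : List (List Char)) (hne : rows ≠ [])
    (hlen : ∀ r ∈ rows, r.length = w) :
    pvT rows = (List.range w).map (fun c => rows.map (fun r => r.getD c ' ')) := by
  induction w generalizing rows with
  | zero =>
    match rows with
    | r0 :: rs =>
      have : r0 = [] := List.length_eq_zero_iff.mp (hlen r0 (by simp))
      subst this; simp [pvT, pvTgo]
  | succ w ih =>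
    match rows with
    | r0 :: rs =>
      match hr0 : r0 with
      | [] => exact absurd (hlen [] (by simp)) (by simp)
      | a :: r0' =>
        have hall : rs.all (fun q => !q.isEmpty) = true := by
          simp only [List.all_eq_true]
          intro q hq
          have hq1 : q.length = w + 1 := hlen q (by simp [hq])
          cases q with
          | nil => simp at hq1
          | cons _ _ => simp
        have hrec := ih (r0' :: rs.map List.tail) (by simp)
          (by
            intro r hr
            simp only [List.mem_cons, List.mem_map] at hr
            rcases hr with h | ⟨q, hq, h⟩
            · have h1 : (a :: r0').length = w + 1 := hlen (a :: r0') (by simp)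
              subst h
              simp at h1
              omega
            · have h1 : q.length = w + 1 := hlen q (by simp [hq])
              subst h
              simp [h1])
        rw [List.range_succ_eq_map]
        simp only [pvT, pvTgo, hall, if_true, List.map_cons, List.map_map]
        simp only [List.cons.injEq]
        refine ⟨⟨rfl, ?_⟩, ?_⟩
        · exact List.map_congr_left (fun q _ => pvHeadD_getD q)
        · rw [show pvTgo r0' (rs.map List.tail) = pvT (r0' :: rs.map List.tail) from rfl, hrec]
          apply List.map_congr_left
          intro c _
          simp only [Function.comp, List.map_cons, List.map_map, List.getD_cons_succ]
          congr 1
          exact List.map_congr_left (fun q _ => pvTailD_getD q c)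

-- enumerate + filter over the columns = the false indices of the sep list
theorem pvEnum_falseIdx (w : Nat) (off : Int) (colF : Nat → List Char) (g : Nat → Bool)
    (h : ∀ k < w, (colF k).any (fun ch => ch != ' ') = ! g k) :
    ((PySem.List.enumerate ((List.range w).map colF) off).filter
        (fun p => p.2.any (fun ch => ch != ' '))).map (fun p => p.1) =
      pvFalseIdx ((List.range w).map g) off := by
  induction w generalizing off colF g with
  | zero => simp [pvFalseIdx]
  | succ w ih =>
    rw [List.range_succ_eq_map]
    simp only [List.map_cons, List.map_map, PySem.List.enumerate_cons, List.filter_cons]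
    have h0 := h 0 (Nat.succ_pos w)
    have ihh := ih (off + 1) (colF ∘ Nat.succ) (g ∘ Nat.succ)
      (fun k hk => h (k + 1) (by omega))
    by_cases hg : g 0 = true
    · rw [h0, hg]
      simp only [Bool.not_true, Bool.false_eq_true, if_false, pvFalseIdx, if_true]
      exact ihh
    · have hg' : g 0 = false := by simpa using hg
      rw [h0, hg']
      simp only [Bool.not_false, if_true, List.map_cons, pvFalseIdx,
        Bool.false_eq_true, if_false]
      rw [ihh]

-- any/all bridge for one column
theorem pvCol_any (padded : List (List Char)) (k : Nat) :
    (padded.map (fun r => r.getD k ' ')).any (fun ch => ch != ' ') =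
      ! padded.all (fun row => PySem.List.pyGetD row (k : Int) ' ' == ' ') := by
  simp only [List.any_map, PySem.List.pyGetD_natCast]
  rw [Bool.eq_iff_iff]
  simp only [List.any_eq_true, Bool.not_eq_eq_eq_not, Bool.not_true, List.all_eq_false,
    Function.comp, bne_iff_ne, ne_eq]
  exact exists_congr fun x => and_congr_right fun _ => by simp

-- ===== VERDICT (by name: the statement is the Claim_ definition above) =====
theorem find_problems_spec : Claim_equal_find_problems := by
  intro lines _ hpre
  unfold Spec_find_problems find_problems find_problems_alt
  match hmax : PySem.List.max? (lines.map (fun l => PySem.Str.len l)) (fun x => x) with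
  | none =>
    have := (PySem.List.max?_eq_none_iff _ _).mp hmax
    simp only [List.map_eq_nil_iff] at this
    exact absurd this hpre
  | some width =>
    simp only []
    set w := width.toNat with hw
    set padded := lines.map (fun l => pvLjust l.toList w) with hpadded
    refine Prod.ext ?_ rfl
    have hmaxIs := PySem.List.max?_isMax hmax
    have hne0 : lines ≠ [] := hpre
    have h0w : 0 ≤ width := by
      obtain ⟨l0, t0, hlines⟩ := List.exists_cons_of_ne_nil hne0
      have h1 := hmaxIs (PySem.Str.len l0)
        (by rw [hlines]; exact List.mem_map_of_mem (by simp))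
      rw [PySem.Str.len_eq] at h1
      omega
    have hrowlen : ∀ r ∈ padded, r.length = w := by
      intro r hr
      rw [hpadded] at hr
      simp only [List.mem_map] at hr
      obtain ⟨l, hl, hrl⟩ := hr
      have h1 := hmaxIs (PySem.Str.len l) (List.mem_map_of_mem hl)
      rw [PySem.Str.len_eq] at h1
      have hlw : l.toList.length ≤ w := by omega
      subst hrl
      simp only [pvLjust, List.length_append, List.length_replicate]
      omega
    have hpne : padded ≠ [] := by
      rw [hpadded]; simpa using hpre
    have hsep : (PySem.List.pyRange 0 width 1).map
        (fun c => padded.all (fun row => PySem.List.pyGetD row c ' ' == ' ')) =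
        (List.range w).map
          (fun k : Nat => padded.all (fun row => PySem.List.pyGetD row (k : Int) ' ' == ' ')) := by
      rw [PySem.List.pyRange_one]
      simp only [Int.sub_zero, List.map_map]
      apply List.map_congr_left
      intro k _
      simp
    rw [hsep]
    rw [pvT_rect w padded hpne hrowlen]
    rw [pvEnum_falseIdx w 0 (fun c => padded.map (fun r => r.getD c ' '))
        (fun k => padded.all (fun row => PySem.List.pyGetD row (k : Int) ' ' == ' '))
        (fun k _ => pvCol_any padded k)]
    have hfin := pvScan_merge ((List.range w).map
        (fun k : Nat => padded.all (fun row => PySem.List.pyGetD row (k : Int) ' ' == ' '))).length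
      _ le_rfl 0 [] (by simp)
    simpa using hfin.symm
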